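-- pv_equiv track=rewrite | github.com/jinczing/IBCGA | ibcga-svc-py/IGAFrame.py | gen_OA
-- ===== SOURCE A (Python) =====
-- def gen_OA(factor = 5):
--     r"""OA generatin subroutine """
--     OA = []
--     level=2
--     temp= level-1
--
--     J=1
--     while (((level**J)-1)/temp)< factor:
--         J+=1
--
--     exp= level**J
--
--     OA= [[0 for j in range(factor)] for i in range(exp)]
--
--     remaind= exp
--     pow_level_k= 1
--     for k in range(0, J):
--         j= (pow_level_k-1)/temp
--         remaind/= level
--         for i in range(0, exp):
--             OA[i][int(j)]= int((i/int(remaind))%level)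
--         pow_level_k*= level
--
--     pow_level_k= level
--     for k in range(1, J):
--         j= (pow_level_k-1)/temp
--         for s in range(0, int(j)):
--             for t in range(1, temp+1):
--                 if (t+j+s*temp)<factor:
--                     for i in range(0, exp):
--                         OA[i][int(t+j+s*temp)] = int((OA[i][s]*t+OA[i][int(j)])%level)
--         pow_level_k*= level
--
--     return(OA)
--     pass
-- ===== SOURCE B (Python) =====
-- def gen_OA(factor=5):
--     """OA generation: per-column bit masks + parity fill (level 2)."""
--     J = 1
--     while 2 ** J - 1 < factor:
--         J += 1
--     exp = 2 ** J
--     # one generator mask per column: column c of row i is parity of (i & masks[c])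
--     masks = [0] * factor
--     for k in range(J):
--         masks[2 ** k - 1] = 1 << (J - 1 - k)          # basic columns
--     for k in range(1, J):
--         j = 2 ** k - 1
--         for s in range(j):
--             c = j + s + 1
--             if c < factor:
--                 masks[c] = masks[s] ^ masks[j]        # derived columns
--     return [[bin(i & m).count('1') % 2 for m in masks] for i in range(exp)]
-- ===== Notes on version B (the rewrite author's own statement) =====
-- stated objective: alternative
-- what changed: Instead of filling the table cell-by-cell with a forward recurrence over already-filled columns, B first builds one integer generator mask per column (a single bit for basic columns, XOR of two masks for derived columns) and then fills every cell independently as the parity of i AND mask[c].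
import Mathlib
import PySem

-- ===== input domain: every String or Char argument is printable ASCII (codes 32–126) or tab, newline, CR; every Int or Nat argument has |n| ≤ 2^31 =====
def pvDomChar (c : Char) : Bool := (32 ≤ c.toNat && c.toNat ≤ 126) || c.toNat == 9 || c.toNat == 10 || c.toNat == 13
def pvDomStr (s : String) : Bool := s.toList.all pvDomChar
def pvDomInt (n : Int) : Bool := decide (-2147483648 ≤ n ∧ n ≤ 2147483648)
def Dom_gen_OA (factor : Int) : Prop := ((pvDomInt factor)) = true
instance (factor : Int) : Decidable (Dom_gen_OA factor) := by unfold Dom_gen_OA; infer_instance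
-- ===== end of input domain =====

-- B replaces A's cell-by-cell forward recurrence over already-filled columns by per-column
-- generator masks and an independent parity fill (objective: alternative decomposition).

-- ===== PORT A =====

-- Python: `while ((level**J)-1)/temp < factor: J += 1` with level=2, temp=1; the float
-- division by temp=1 is exact, so the comparison is the integer comparison below.
def gen_OA_findJ (factor : Int) (J : Nat) : Nat :=
  if (2:Int) ^ J - 1 < factor then gen_OA_findJ factor (J + 1) else J
termination_by (factor + 1 - 2 ^ J).toNat
decreasing_by
  have h2 : (0:Int) < 2 ^ J := by positivity
  omega

-- Python `OA[i][j] = v` / `OA[i][j]` with indices provably in range, so set/getD are exact.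
def pvWrite (OA : List (List Int)) (i j : Nat) (v : Int) : List (List Int) :=
  OA.set i ((OA.getD i []).set j v)
def pvRead (OA : List (List Int)) (i j : Nat) : Int := (OA.getD i []).getD j 0

-- body of A's first `for k` loop; state = (OA, remaind, pow_level_k).
-- Python float arithmetic here is exact: `(pow_level_k-1)/temp` divides by temp=1,
-- `remaind /= level` halves a power of two, and `int((i/int(remaind))%level)` has a
-- power-of-two divisor and i < 2^53, so it is the integer (i // remaind) % level.
def gen_OA_loop1 (level temp exp : Int) (st : List (List Int) × Int × Int) (_k : Nat) :
    List (List Int) × Int × Int :=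
  let j : Int := (st.2.2 - 1) / temp
  let remaind : Int := st.2.1 / level
  let OA' := (List.range exp.toNat).foldl
    (fun OA i => pvWrite OA i j.toNat (((i : Int) / remaind) % level)) st.1
  (OA', remaind, st.2.2 * level)

-- body of A's second `for k` loop; state = (OA, pow_level_k); same float-exactness notes.
def gen_OA_loop2 (factor level temp : Int) (exp : Int) (st : List (List Int) × Int) (_k : Nat) :
    List (List Int) × Int :=
  let j : Int := (st.2 - 1) / temp
  let OA' := (List.range j.toNat).foldl (fun OA (s : Nat) =>
    (List.range' 1 temp.toNat).foldl (fun OA (t : Nat) =>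
      if (t : Int) + j + (s : Int) * temp < factor then
        (List.range exp.toNat).foldl (fun OA i =>
          pvWrite OA i ((t : Int) + j + (s : Int) * temp).toNat
            ((pvRead OA i s * (t : Int) + pvRead OA i j.toNat) % level)) OA
      else OA) OA) st.1
  (OA', st.2 * level)

-- literal port of A
def gen_OA (factor : Int) : List (List Int) :=
  let level : Int := 2
  let temp : Int := level - 1
  let J : Nat := gen_OA_findJ factor 1
  let exp : Int := level ^ J
  let OA : List (List Int) :=
    (List.range exp.toNat).map (fun _ => (List.range factor.toNat).map (fun _ => (0:Int)))
  let s1 := (List.range J).foldl (gen_OA_loop1 level temp exp) (OA, exp, 1)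
  let s2 := (List.range' 1 (J - 1)).foldl (gen_OA_loop2 factor level temp exp) (s1.1, level)
  s2.1

-- ===== PORT B =====

-- Python: Source B's own `while` loop computing J (same J as A's, proved below).
def gen_OA_alt_findJ (factor : Int) (J : Nat) : Nat :=
  if (2:Int) ^ J - 1 < factor then gen_OA_alt_findJ factor (J + 1) else J
termination_by (factor + 1 - 2 ^ J).toNat
decreasing_by
  have h2 : (0:Int) < 2 ^ J := by positivity
  omega

-- Python `bin(n).count('1')`: number of set bits of a nonnegative int.
def pvPopCount (n : Nat) : Nat :=
  if n = 0 then 0 else n % 2 + pvPopCount (n / 2)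

-- Source B: basic-column masks, `masks[2**k-1] = 1 << (J-1-k)`
def gen_OA_alt_set1 (J : Nat) (masks : List Nat) (k : Nat) : List Nat :=
  masks.set (2 ^ k - 1) (1 <<< (J - 1 - k))

-- Source B: derived-column masks for one k, `masks[c] = masks[s] ^ masks[j]`
def gen_OA_alt_set2 (factor : Int) (masks : List Nat) (k : Nat) : List Nat :=
  let j := 2 ^ k - 1
  (List.range j).foldl (fun masks (s : Nat) =>
    let c := j + s + 1
    if (c : Int) < factor then masks.set c (masks.getD s 0 ^^^ masks.getD j 0) else masks) masks

-- literal port of B (list indices are provably in range, so set/getD are exact)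
def gen_OA_alt (factor : Int) : List (List Int) :=
  let J : Nat := gen_OA_alt_findJ factor 1
  let exp : Nat := 2 ^ J
  let masks0 : List Nat := List.replicate factor.toNat 0
  let masks1 := (List.range J).foldl (gen_OA_alt_set1 J) masks0
  let masks2 := (List.range' 1 (J - 1)).foldl (gen_OA_alt_set2 factor) masks1
  (List.range exp).map (fun i =>
    masks2.map (fun m => ((pvPopCount (i &&& m) % 2 : Nat) : Int)))

-- ===== PRECONDITION & SPEC =====
-- Pre_ excludes nonpositive factor, on which A raises IndexError (and so does B).
def Pre_gen_OA (factor : Int) : Prop := 1 ≤ factor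
instance (factor : Int) : Decidable (Pre_gen_OA factor) := by unfold Pre_gen_OA; infer_instance
def pvWitness_gen_OA : Int := (5)

def Spec_gen_OA (factor : Int) (out : List (List Int)) : Prop := out = gen_OA_alt factor
instance (factor : Int) (out : List (List Int)) : Decidable (Spec_gen_OA factor out) := by unfold Spec_gen_OA; infer_instance

-- ===== CLAIM (what is proved, stated in full; the proofs are below) =====
def Claim_equal_gen_OA : Prop := ∀ (factor : Int), Dom_gen_OA factor → Pre_gen_OA factor → Spec_gen_OA factor (gen_OA factor)

-- ===== LEMMAS AND PROOFS =====

-- the table of values f i j, i < E rows, j < F columns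
def pvTab (E F : Nat) (f : Nat → Nat → Int) : List (List Int) :=
  (List.range E).map (fun i => (List.range F).map (f i))

-- the table B's masks denote: cell (i,j) = parity of i AND masks[j]
def pvM (masks : List Nat) (i j : Nat) : Int :=
  ((pvPopCount (i &&& masks.getD j 0) % 2 : Nat) : Int)

lemma pvTab_congr (E F : Nat) (f g : Nat → Nat → Int)
    (h : ∀ i < E, ∀ j < F, f i j = g i j) : pvTab E F f = pvTab E F g := by
  unfold pvTab
  apply List.map_congr_left
  intro i hi
  apply List.map_congr_left
  intro j hj
  simp only [List.mem_range] at hi hj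
  exact h i hi j hj

lemma pvRead_tab (E F : Nat) (f : Nat → Nat → Int) (i j : Nat) (hi : i < E) (hj : j < F) :
    pvRead (pvTab E F f) i j = f i j := by
  simp [pvRead, pvTab, List.getD_eq_getElem?_getD, hi, hj]

lemma pvWrite_tab (E F : Nat) (f : Nat → Nat → Int) (n c : Nat) (v : Int)
    (hn : n < E) (_hc : c < F) :
    pvWrite (pvTab E F f) n c v
      = pvTab E F (fun i j => if i = n ∧ j = c then v else f i j) := by
  unfold pvWrite pvTab
  have hg : ((List.range E).map (fun i => (List.range F).map (f i))).getD n [] = (List.range F).map (f n) := by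
    simp [List.getD_eq_getElem?_getD, hn]
  rw [hg]
  apply List.ext_getElem
  · simp
  · intro i h1 h2
    simp only [List.length_set, List.length_map, List.length_range] at h1
    rw [List.getElem_set]
    by_cases hin : n = i
    · subst hin
      rw [if_pos rfl]
      simp only [List.getElem_map, List.getElem_range]
      apply List.ext_getElem
      · simp
      · intro j hj1 hj2
        simp only [List.length_set, List.length_map, List.length_range] at hj1
        rw [List.getElem_set]
        simp only [List.getElem_map, List.getElem_range]
        by_cases hjc : c = j
        · subst hjc
          simp
        · rw [if_neg hjc]
          have hne : j ≠ c := fun h => hjc h.symm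
          simp [hne]
    · rw [if_neg hin]
      simp only [List.getElem_map, List.getElem_range]
      apply List.map_congr_left
      intro j hj
      have hne : ¬ (i = n ∧ j = c) := fun h => hin h.1.symm
      simp [hne]

-- a row-wise column write, value computed from the current table
lemma pvFoldWrite (E F c : Nat) (hc : c < F) (w : Nat → List (List Int) → Int)
    (f : Nat → Nat → Int) (v : Nat → Int)
    (hw : ∀ n g, n < E → (∀ j, j < F → g n j = f n j) → w n (pvTab E F g) = v n) :
    (List.range E).foldl (fun OA i => pvWrite OA i c (w i OA)) (pvTab E F f)
      = pvTab E F (fun i j => if j = c then v i else f i j) := by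
  suffices h : ∀ n, n ≤ E → (List.range n).foldl (fun OA i => pvWrite OA i c (w i OA)) (pvTab E F f)
      = pvTab E F (fun i j => if i < n ∧ j = c then v i else f i j) by
    rw [h E le_rfl]
    exact pvTab_congr _ _ _ _ (by intro i hi j hj; simp [hi])
  intro n
  induction n with
  | zero =>
    intro _
    simp only [List.range_zero, List.foldl_nil]
    exact pvTab_congr _ _ _ _ (by intro i hi j hj; simp)
  | succ m ih =>
    intro hn
    rw [List.range_succ, List.foldl_append, ih (by omega)]
    simp only [List.foldl_cons, List.foldl_nil]
    rw [hw m (fun i j => if i < m ∧ j = c then v i else f i j) (by omega)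
        (fun j hj => by simp)]
    rw [pvWrite_tab E F (fun i j => if i < m ∧ j = c then v i else f i j) m c (v m)
        (by omega) hc]
    apply pvTab_congr
    intro i hi j hj
    by_cases h1 : i = m
    · subst h1
      by_cases h2 : j = c
      · subst h2; simp
      · simp [h2]
    · by_cases h2 : j = c
      · subst h2
        by_cases h3 : i < m
        · simp [h1, h3, show i < m + 1 by omega]
        · simp [h1, h3, show ¬ i < m + 1 by omega]
      · simp [h2]

lemma pvFoldWrite1 (E F c : Nat) (hc : c < F) (v : Nat → Int) (f : Nat → Nat → Int) :
    (List.range E).foldl (fun OA i => pvWrite OA i c (v i)) (pvTab E F f)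
      = pvTab E F (fun i j => if j = c then v i else f i j) := by
  exact pvFoldWrite E F c hc (fun i _ => v i) f v (fun n g hn hg => rfl)

lemma pvFoldWrite2 (E F c : Nat) (hc : c < F) (s jn : Nat) (hs : s < F) (hjn : jn < F)
    (t : Int) (f : Nat → Nat → Int) :
    (List.range E).foldl (fun OA i =>
        pvWrite OA i c ((pvRead OA i s * t + pvRead OA i jn) % 2)) (pvTab E F f)
      = pvTab E F (fun i j => if j = c then (f i s * t + f i jn) % 2 else f i j) := by
  exact pvFoldWrite E F c hc (fun i OA => (pvRead OA i s * t + pvRead OA i jn) % 2) f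
    (fun i => (f i s * t + f i jn) % 2)
    (fun n g hn hg => by
      show (pvRead (pvTab E F g) n s * t + pvRead (pvTab E F g) n jn) % 2
          = (f n s * t + f n jn) % 2
      rw [pvRead_tab E F g n s hn hs, pvRead_tab E F g n jn hn hjn, hg s hs, hg jn hjn])

-- findJ facts
lemma findJ_alt_eq (factor : Int) (J0 : Nat) :
    gen_OA_alt_findJ factor J0 = gen_OA_findJ factor J0 := by
  fun_induction gen_OA_alt_findJ factor J0 with
  | case1 J0 h ih => rw [gen_OA_findJ, if_pos h]; exact ih
  | case2 J0 h => rw [gen_OA_findJ, if_neg h]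

lemma findJ_le (factor : Int) (J0 : Nat) : J0 ≤ gen_OA_findJ factor J0 := by
  fun_induction gen_OA_findJ factor J0 with
  | case1 J0 h ih => omega
  | case2 J0 h => omega

lemma findJ_ge (factor : Int) (J0 : Nat) : factor ≤ 2 ^ (gen_OA_findJ factor J0) - 1 := by
  fun_induction gen_OA_findJ factor J0 with
  | case1 J0 h ih => exact ih
  | case2 J0 h => omega

lemma findJ_min (factor : Int) (J0 : Nat) :
    ∀ k, J0 ≤ k → k < gen_OA_findJ factor J0 → (2:Int) ^ k - 1 < factor := by
  fun_induction gen_OA_findJ factor J0 with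
  | case1 J0 h ih =>
    intro k hk1 hk2
    rcases eq_or_lt_of_le hk1 with rfl | h2
    · exact h
    · exact ih k (by omega) hk2
  | case2 J0 h => intro k hk1 hk2; omega

-- popcount facts
lemma pvPopCount_zero : pvPopCount 0 = 0 := by rw [pvPopCount]; simp

lemma pvPopCount_eq (n : Nat) : pvPopCount n = n % 2 + pvPopCount (n / 2) := by
  by_cases h : n = 0
  · subst h
    rw [pvPopCount]
    simp
  · conv_lhs => rw [pvPopCount]
    rw [if_neg h]

lemma pvPopCount_two_pow (t : Nat) : pvPopCount (2 ^ t) = 1 := by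
  induction t with
  | zero => rw [pvPopCount_eq]; simp [pvPopCount_zero]
  | succ m ih =>
    rw [pvPopCount_eq]
    have h1 : 2 ^ (m + 1) % 2 = 0 := by
      simp [pow_succ, Nat.mul_mod_left]
    have h2 : 2 ^ (m + 1) / 2 = 2 ^ m := by
      rw [pow_succ]
      exact Nat.mul_div_cancel _ (by norm_num)
    rw [h1, h2, ih]

lemma pvPopCount_xor (x y : Nat) :
    pvPopCount (x ^^^ y) % 2 = (pvPopCount x + pvPopCount y) % 2 := by
  induction x using Nat.strongRecOn generalizing y with
  | ind x ih =>
    by_cases hx : x = 0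
    · subst hx; simp [pvPopCount_zero]
    · rw [pvPopCount_eq (x ^^^ y), pvPopCount_eq x, pvPopCount_eq y]
      have h2 : (x ^^^ y) / 2 = x / 2 ^^^ y / 2 := by simp [Nat.xor_div_two]
      have h1 : (x ^^^ y) % 2 = (x + y) % 2 := Nat.xor_mod_two_eq ..
      have h3 := ih (x / 2) (Nat.div_lt_self (Nat.pos_of_ne_zero hx) one_lt_two) (y / 2)
      rw [h2]
      omega

-- A's basic-column value equals the parity of i AND 2^t
lemma pvAR1 (i t : Nat) :
    ((i : Int) / (2:Int) ^ t) % 2 = ((pvPopCount (i &&& 2 ^ t) % 2 : Nat) : Int) := by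
  have hcast : ((i : Int) / (2:Int) ^ t) % 2 = ((i / 2 ^ t % 2 : Nat) : Int) := by
    norm_cast
  rw [hcast, Nat.and_two_pow]
  have htb : (i.testBit t).toNat = i / 2 ^ t % 2 := Nat.toNat_testBit ..
  cases h : i.testBit t
  · rw [h] at htb
    simp only [Bool.toNat_false] at htb
    simp only [Bool.toNat_false, Nat.zero_mul, pvPopCount_zero]
    omega
  · rw [h] at htb
    simp only [Bool.toNat_true] at htb
    simp only [Bool.toNat_true, Nat.one_mul, pvPopCount_two_pow]
    omega

-- A's derived-column value equals the parity for the XOR mask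
lemma pvAR2 (i a b : Nat) :
    (((pvPopCount (i &&& a) % 2 : Nat) : Int) * 1 + ((pvPopCount (i &&& b) % 2 : Nat) : Int)) % 2
      = ((pvPopCount (i &&& (a ^^^ b)) % 2 : Nat) : Int) := by
  rw [Nat.and_xor_distrib_left, pvPopCount_xor]
  omega

lemma pvGetD_set (l : List Nat) (c : Nat) (v : Nat) (j : Nat) :
    (l.set c v).getD j 0 = if j = c ∧ c < l.length then v else l.getD j 0 := by
  rcases lt_or_ge j l.length with hj | hj
  · rw [List.getD_eq_getElem _ _ (by simpa using hj), List.getElem_set]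
    by_cases h : c = j
    · subst h
      simp [hj]
    · rw [if_neg h, if_neg (by intro hh; exact h hh.1.symm)]
      rw [List.getD_eq_getElem _ _ hj]
  · have h1 : (l.set c v).getD j 0 = 0 := by
      rw [List.getD_eq_getElem?_getD, List.getElem?_eq_none (by simpa using hj)]
      rfl
    have h2 : l.getD j 0 = 0 := by
      rw [List.getD_eq_getElem?_getD, List.getElem?_eq_none hj]
      rfl
    rw [h1, h2]
    split <;> [skip; rfl]
    rename_i hh
    omega

lemma pvLen_set1_gen (J : Nat) (ks : List Nat) (l : List Nat) :
    (ks.foldl (gen_OA_alt_set1 J) l).length = l.length := by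
  induction ks generalizing l with
  | nil => rfl
  | cons a ks ih => simp [List.foldl_cons, ih, gen_OA_alt_set1]

lemma pvLen_set1 (J : Nat) (F : Nat) (k : Nat) :
    ((List.range k).foldl (gen_OA_alt_set1 J) (List.replicate F 0)).length = F := by
  rw [pvLen_set1_gen, List.length_replicate]

lemma pvLen_set2_inner (factor : Int) (jn : Nat) (ss : List Nat) (l : List Nat) :
    (ss.foldl (fun masks (s : Nat) =>
        if ((jn + s + 1 : Nat) : Int) < factor then
          masks.set (jn + s + 1) (masks.getD s 0 ^^^ masks.getD jn 0)
        else masks) l).length = l.length := by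
  induction ss generalizing l with
  | nil => rfl
  | cons a ss ih =>
    simp only [List.foldl_cons]
    rw [ih]
    split <;> simp

lemma pvLen_set2 (factor : Int) (l : List Nat) (ks : List Nat) :
    (ks.foldl (gen_OA_alt_set2 factor) l).length = l.length := by
  induction ks generalizing l with
  | nil => rfl
  | cons a ks ih =>
    simp only [List.foldl_cons]
    rw [ih, gen_OA_alt_set2, pvLen_set2_inner]

-- phase-1 invariant
lemma pvPhase1 (factor : Int) (hf : 1 ≤ factor) :
    ∀ k, k ≤ gen_OA_findJ factor 1 →
    (List.range k).foldl
        (gen_OA_loop1 2 (2 - 1) ((2:Int) ^ (gen_OA_findJ factor 1)))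
        (pvTab (2 ^ (gen_OA_findJ factor 1)) factor.toNat (fun _ _ => 0),
          (2:Int) ^ (gen_OA_findJ factor 1), 1)
      = (pvTab (2 ^ (gen_OA_findJ factor 1)) factor.toNat
            (pvM ((List.range k).foldl (gen_OA_alt_set1 (gen_OA_findJ factor 1))
              (List.replicate factor.toNat 0))),
          (2:Int) ^ (gen_OA_findJ factor 1 - k), (2:Int) ^ k) := by
  set J := gen_OA_findJ factor 1 with hJ
  have hJ1 : 1 ≤ J := findJ_le factor 1
  have hFc : factor ≤ 2 ^ J - 1 := findJ_ge factor 1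
  intro k
  induction k with
  | zero =>
    intro _
    simp only [List.range_zero, List.foldl_nil, Nat.sub_zero, pow_zero]
    have htab : pvTab (2 ^ J) factor.toNat (fun _ _ => (0:Int))
        = pvTab (2 ^ J) factor.toNat (pvM (List.replicate factor.toNat 0)) := by
      apply pvTab_congr
      intro i hi j hj
      unfold pvM
      have hget : (List.replicate factor.toNat (0:Nat)).getD j 0 = 0 := by
        rcases lt_or_ge j factor.toNat with h | h
        · rw [List.getD_eq_getElem _ _ (by simpa using h)]
          simp
        · rw [List.getD_eq_getElem?_getD, List.getElem?_eq_none (by simpa using h)]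
          rfl
      rw [hget]
      simp [Nat.and_zero, pvPopCount_zero]
    rw [htab]
  | succ m ih =>
    intro hk
    have hmJ : m < J := by omega
    rw [List.range_succ, List.foldl_append, ih (by omega)]
    simp only [List.foldl_cons, List.foldl_nil]
    simp only [gen_OA_loop1]
    -- scalar facts
    have hpm : (2:Int) ^ m = ((2 ^ m : Nat) : Int) := by push_cast; ring
    have hj : ((2:Int) ^ m - 1) / (2 - 1) = 2 ^ m - 1 := by omega
    have hjt : ((2:Int) ^ m - 1).toNat = 2 ^ m - 1 := by omega
    have hrem : (2:Int) ^ (J - m) / 2 = 2 ^ (J - (m + 1)) := by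
      have h1 : (2:Int) ^ (J - m) = 2 ^ (J - (m + 1)) * 2 := by
        rw [← pow_succ]
        congr 1
        omega
      rw [h1]
      omega
    have hexp : ((2:Int) ^ J).toNat = 2 ^ J := by
      have h1 : (2:Int) ^ J = ((2 ^ J : Nat) : Int) := by push_cast; ring
      omega
    -- the column index is in range
    have hcI : (2:Int) ^ m - 1 < factor := by
      rcases Nat.eq_zero_or_pos m with rfl | hm
      · simpa using hf
      · exact findJ_min factor 1 m (by omega) (by omega)
    have hc : 2 ^ m - 1 < factor.toNat := by omega
    simp only [hj, hjt, hrem, hexp]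
    rw [pvFoldWrite1 (2 ^ J) factor.toNat (2 ^ m - 1) hc
        (fun i => ((i : Int) / 2 ^ (J - (m + 1))) % 2)
        (pvM ((List.range m).foldl (gen_OA_alt_set1 J) (List.replicate factor.toNat 0)))]
    rw [List.foldl_append]
    simp only [List.foldl_cons, List.foldl_nil]
    have hlen : ((List.range m).foldl (gen_OA_alt_set1 J) (List.replicate factor.toNat 0)).length
        = factor.toNat := pvLen_set1 J factor.toNat m
    have htab : pvTab (2 ^ J) factor.toNat
          (fun i j => if j = 2 ^ m - 1 then ((i : Int) / 2 ^ (J - (m + 1))) % 2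
            else pvM ((List.range m).foldl (gen_OA_alt_set1 J) (List.replicate factor.toNat 0)) i j)
        = pvTab (2 ^ J) factor.toNat
            (pvM (gen_OA_alt_set1 J
              ((List.range m).foldl (gen_OA_alt_set1 J) (List.replicate factor.toNat 0)) m)) := by
      apply pvTab_congr
      intro i hi j hjF
      have hset : gen_OA_alt_set1 J
            ((List.range m).foldl (gen_OA_alt_set1 J) (List.replicate factor.toNat 0)) m
          = ((List.range m).foldl (gen_OA_alt_set1 J) (List.replicate factor.toNat 0)).set
              (2 ^ m - 1) (1 <<< (J - 1 - m)) := rfl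
      rw [hset]
      unfold pvM
      rw [pvGetD_set, hlen]
      by_cases hjc : j = 2 ^ m - 1
      · rw [if_pos hjc,
          if_pos (show j = 2 ^ m - 1 ∧ 2 ^ m - 1 < factor.toNat from ⟨hjc, hc⟩),
          Nat.one_shiftLeft]
        have hee : J - (m + 1) = J - 1 - m := by omega
        rw [hee]
        exact pvAR1 i (J - 1 - m)
      · rw [if_neg hjc,
          if_neg (show ¬ (j = 2 ^ m - 1 ∧ 2 ^ m - 1 < factor.toNat) from fun h => hjc h.1)]
    rw [htab]
    have hpow2 : (2:Int) ^ m * 2 = 2 ^ (m + 1) := by rw [pow_succ]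
    rw [hpow2]
-- phase-2 inner loop (one value of k): A's table fold matches B's mask fold
lemma pvInner2 (factor : Int) (hf : 1 ≤ factor) (E F : Nat) (hF : F = factor.toNat)
    (jn : Nat) (hjn : jn < F) :
    ∀ m, m ≤ jn → ∀ mk : List Nat, mk.length = F →
    (List.range m).foldl (fun OA (s : Nat) =>
        if (1 : Int) + ((jn : Nat) : Int) + (s : Int) * 1 < factor then
          (List.range E).foldl (fun OA i =>
            pvWrite OA i ((1 : Int) + ((jn : Nat) : Int) + (s : Int) * 1).toNat
              ((pvRead OA i s * 1 + pvRead OA i jn) % 2)) OA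
        else OA) (pvTab E F (pvM mk))
      = pvTab E F (pvM ((List.range m).foldl (fun masks (s : Nat) =>
          if ((jn + s + 1 : Nat) : Int) < factor then
            masks.set (jn + s + 1) (masks.getD s 0 ^^^ masks.getD jn 0)
          else masks) mk)) := by
  intro m
  induction m with
  | zero =>
    intro _ mk _
    simp only [List.range_zero, List.foldl_nil]
  | succ m ih =>
    intro hm mk hlen
    rw [List.range_succ, List.foldl_append, List.foldl_append, ih (by omega) mk hlen]
    simp only [List.foldl_cons, List.foldl_nil]
    have hlenm : ((List.range m).foldl (fun masks (s : Nat) =>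
        if ((jn + s + 1 : Nat) : Int) < factor then
          masks.set (jn + s + 1) (masks.getD s 0 ^^^ masks.getD jn 0)
        else masks) mk).length = F := by
      rw [pvLen_set2_inner]
      exact hlen
    have hcc : ((1 : Int) + ((jn : Nat) : Int) + (m : Int) * 1) = ((jn + m + 1 : Nat) : Int) := by
      push_cast
      ring
    rw [hcc]
    by_cases hcond : ((jn + m + 1 : Nat) : Int) < factor
    · rw [if_pos hcond, if_pos hcond]
      have hcN : jn + m + 1 < F := by omega
      have htn : (((jn + m + 1 : Nat) : Int)).toNat = jn + m + 1 := by omega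
      rw [htn]
      rw [pvFoldWrite2 E F (jn + m + 1) hcN m jn (by omega) hjn 1]
      apply pvTab_congr
      intro i hi j hj
      unfold pvM
      rw [pvGetD_set]
      by_cases hjc : j = jn + m + 1
      · rw [if_pos hjc, if_pos (by rw [hlenm]; exact ⟨hjc, hcN⟩)]
        exact pvAR2 i _ _
      · rw [if_neg hjc, if_neg (fun h => hjc h.1)]
    · rw [if_neg hcond, if_neg hcond]

-- phase-2 invariant
lemma pvPhase2 (factor : Int) (hf : 1 ≤ factor) :
    ∀ n, n ≤ gen_OA_findJ factor 1 - 1 → ∀ mk : List Nat, mk.length = factor.toNat →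
    (List.range' 1 n).foldl
        (gen_OA_loop2 factor 2 (2 - 1) ((2:Int) ^ (gen_OA_findJ factor 1)))
        (pvTab (2 ^ (gen_OA_findJ factor 1)) factor.toNat (pvM mk), 2)
      = (pvTab (2 ^ (gen_OA_findJ factor 1)) factor.toNat
            (pvM ((List.range' 1 n).foldl (gen_OA_alt_set2 factor) mk)),
          (2:Int) ^ (n + 1)) := by
  set J := gen_OA_findJ factor 1 with hJ
  have hJ1 : 1 ≤ J := findJ_le factor 1
  intro n
  induction n with
  | zero =>
    intro _ mk _
    simp [List.range'_zero, pow_one]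
  | succ n ih =>
    intro hn mk hlen
    have hstep : 1 + 1 * n = n + 1 := by omega
    rw [List.range'_concat, hstep, List.foldl_append, List.foldl_append,
      ih (by omega) mk hlen]
    simp only [List.foldl_cons, List.foldl_nil]
    simp only [gen_OA_loop2]
    -- scalar facts
    have h1n : (1:Nat) ≤ 2 ^ (n + 1) := Nat.one_le_two_pow
    have hcast : (((2 ^ (n + 1) - 1 : Nat)) : Int) = (2:Int) ^ (n + 1) - 1 := by
      push_cast [h1n]
      ring
    have hjI : ((2:Int) ^ (n + 1) - 1) / (2 - 1) = ((2 ^ (n + 1) - 1 : Nat) : Int) := by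
      omega
    have htn : (((2 ^ (n + 1) - 1 : Nat) : Int)).toNat = 2 ^ (n + 1) - 1 := by omega
    have htemp : ((2:Int) - 1).toNat = 1 := by omega
    have hexp : ((2:Int) ^ J).toNat = 2 ^ J := by
      have h1 : (2:Int) ^ J = ((2 ^ J : Nat) : Int) := by push_cast; ring
      rw [h1]
      exact Int.toNat_natCast _
    rw [hjI, htn, htemp, hexp]
    have hr1 : List.range' 1 1 = [1] := rfl
    rw [hr1]
    simp only [List.foldl_cons, List.foldl_nil, Nat.cast_one]
    rw [show (2:Int) - 1 = 1 from by norm_num]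
    -- the derived-row basic column is in range
    have hnJ : n + 1 < J := by omega
    have hjnI : (2:Int) ^ (n + 1) - 1 < factor :=
      findJ_min factor 1 (n + 1) (by omega) (by rw [← hJ]; exact hnJ)
    have hp1 : (2:Int) ^ (n + 1) = ((2 ^ (n + 1) : Nat) : Int) := by push_cast; ring
    have hjnF : 2 ^ (n + 1) - 1 < factor.toNat := by omega
    rw [pvInner2 factor hf (2 ^ J) factor.toNat rfl (2 ^ (n + 1) - 1) hjnF
      (2 ^ (n + 1) - 1) le_rfl ((List.range' 1 n).foldl (gen_OA_alt_set2 factor) mk)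
      (by rw [pvLen_set2]; exact hlen)]
    rw [show ((List.range (2 ^ (n + 1) - 1)).foldl (fun masks (s : Nat) =>
        if ((2 ^ (n + 1) - 1 + s + 1 : Nat) : Int) < factor then
          masks.set (2 ^ (n + 1) - 1 + s + 1)
            (masks.getD s 0 ^^^ masks.getD (2 ^ (n + 1) - 1) 0)
        else masks) ((List.range' 1 n).foldl (gen_OA_alt_set2 factor) mk))
      = gen_OA_alt_set2 factor ((List.range' 1 n).foldl (gen_OA_alt_set2 factor) mk) (n + 1)
      from rfl]
    rw [show (2:Int) ^ (n + 1) * 2 = 2 ^ (n + 1 + 1) from by ring]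

-- the table of a full-width mask list is exactly B's final map
lemma pvTabM_eq (E F : Nat) (masks : List Nat) (hlen : masks.length = F) :
    pvTab E F (pvM masks)
      = (List.range E).map (fun i =>
          masks.map (fun m => ((pvPopCount (i &&& m) % 2 : Nat) : Int))) := by
  unfold pvTab
  apply List.map_congr_left
  intro i _
  apply List.ext_getElem
  · simp [hlen]
  · intro j h1 h2
    simp only [List.length_map, List.length_range] at h1
    simp only [List.getElem_map, List.getElem_range]
    unfold pvM
    rw [List.getD_eq_getElem _ _ (by omega)]

-- ===== VERDICT (by name: the statement is the Claim_ definition above) =====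
theorem gen_OA_spec : Claim_equal_gen_OA := by
  unfold Claim_equal_gen_OA
  intro factor _hdom hf
  unfold Pre_gen_OA at hf
  unfold Spec_gen_OA
  simp only [gen_OA, gen_OA_alt, findJ_alt_eq]
  set J := gen_OA_findJ factor 1 with hJ
  have hexp : ((2:Int) ^ J).toNat = 2 ^ J := by
    have h1 : (2:Int) ^ J = ((2 ^ J : Nat) : Int) := by push_cast; ring
    rw [h1]
    exact Int.toNat_natCast _
  rw [hexp]
  rw [show (List.range (2 ^ J)).map
        (fun _ => (List.range factor.toNat).map (fun _ => (0:Int)))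
      = pvTab (2 ^ J) factor.toNat (fun _ _ => 0) from rfl]
  rw [pvPhase1 factor hf J le_rfl]
  dsimp only
  rw [pvPhase2 factor hf (J - 1) le_rfl
    ((List.range J).foldl (gen_OA_alt_set1 J) (List.replicate factor.toNat 0))
    (pvLen_set1 J factor.toNat J)]
  dsimp only
  rw [pvTabM_eq (2 ^ J) factor.toNat _ (by rw [pvLen_set2, pvLen_set1])]
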